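-- pv_equiv track=rewrite | github.com/oblique-bit/oblique | projects/design-system/scripts-custom/recommend-scripts.py | suggest_workflow
-- ===== SOURCE A (Python) =====
-- from typing import List, Dict, Set
--
-- def suggest_workflow(keywords: Set[str]) -> str:
--     """Suggest a workflow based on keywords."""
--     workflows = []
--
--     if any(word in keywords for word in ['token', 'new', 'create', 'add']):
--         workflows.append('new_tokens')
--     if any(word in keywords for word in ['refactor', 'change', 'modify', 'restructure']):
--         workflows.append('refactor_tokens')
--     if any(word in keywords for word in ['documentation', 'doc', 'markdown']):
--         workflows.append('documentation_update')
--     if any(word in keywords for word in ['file', 'folder', 'organization', 'structure']):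
--         workflows.append('file_organization')
--     if any(word in keywords for word in ['debug', 'issue', 'problem', 'error']):
--         workflows.append('debug_issues')
--
--     return workflows[0] if workflows else 'general'
-- ===== SOURCE B (Python) =====
-- GROUPS = [
--     ['token', 'new', 'create', 'add'],
--     ['refactor', 'change', 'modify', 'restructure'],
--     ['documentation', 'doc', 'markdown'],
--     ['file', 'folder', 'organization', 'structure'],
--     ['debug', 'issue', 'problem', 'error'],
-- ]
-- NAMES = ['new_tokens', 'refactor_tokens', 'documentation_update',
--          'file_organization', 'debug_issues', 'general']
--
--
-- def _priority(word):
--     """Priority of a single keyword: index of the first group containing it, else 5."""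
--     for i, group in enumerate(GROUPS):
--         if word in group:
--             return i
--     return len(GROUPS)
--
--
-- def suggest_workflow(keywords):
--     """Suggest a workflow: min-reduce the per-keyword priorities, then index the name table."""
--     best = len(GROUPS)
--     for word in keywords:
--         p = _priority(word)
--         if p < best:
--             best = p
--     return NAMES[best]
-- ===== Notes on version B (the rewrite author's own statement) =====
-- stated objective: alternative
-- what changed: Inverts the traversal: instead of testing each keyword group against the whole input, B maps every input keyword to a numeric priority (first group containing it), min-reduces those priorities in one pass over the input, and indexes a name table with the minimum; 'general' is priority 5.
import Mathlib
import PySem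

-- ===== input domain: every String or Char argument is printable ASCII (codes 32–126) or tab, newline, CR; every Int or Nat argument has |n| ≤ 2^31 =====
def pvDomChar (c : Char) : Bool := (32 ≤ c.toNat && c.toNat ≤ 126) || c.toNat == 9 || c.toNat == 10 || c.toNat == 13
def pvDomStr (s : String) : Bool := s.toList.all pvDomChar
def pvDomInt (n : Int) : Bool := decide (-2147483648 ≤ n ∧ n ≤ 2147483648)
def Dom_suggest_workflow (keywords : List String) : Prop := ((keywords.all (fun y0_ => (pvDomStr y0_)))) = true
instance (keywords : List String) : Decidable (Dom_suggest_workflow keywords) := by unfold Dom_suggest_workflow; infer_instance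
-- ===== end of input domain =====

-- B inverts the traversal: it maps each input keyword to a numeric priority, min-reduces in one pass, and indexes a name table; objective: alternative (same cost).


-- ===== PORT A =====
def suggest_workflow (keywords : List String) : String :=
  let workflows : List String := []
  let workflows := if (["token", "new", "create", "add"].any (fun word => keywords.contains word)) then workflows ++ ["new_tokens"] else workflows
  let workflows := if (["refactor", "change", "modify", "restructure"].any (fun word => keywords.contains word)) then workflows ++ ["refactor_tokens"] else workflows
  let workflows := if (["documentation", "doc", "markdown"].any (fun word => keywords.contains word)) then workflows ++ ["documentation_update"] else workflows
  let workflows := if (["file", "folder", "organization", "structure"].any (fun word => keywords.contains word)) then workflows ++ ["file_organization"] else workflows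
  let workflows := if (["debug", "issue", "problem", "error"].any (fun word => keywords.contains word)) then workflows ++ ["debug_issues"] else workflows
  match workflows with
  | [] => "general"
  | w :: _ => w

-- ===== PORT B =====
def pvGroups : List (List String) :=
  [ ["token", "new", "create", "add"],
    ["refactor", "change", "modify", "restructure"],
    ["documentation", "doc", "markdown"],
    ["file", "folder", "organization", "structure"],
    ["debug", "issue", "problem", "error"] ]

def pvNames : List String :=
  ["new_tokens", "refactor_tokens", "documentation_update",
   "file_organization", "debug_issues", "general"]

-- _priority's for-loop over enumerate(GROUPS): first index whose group contains the word, else len(GROUPS)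
def pvPriorityLoop (word : String) : List (Int × List String) → Int
  | [] => (pvGroups.length : Int)
  | (i, g) :: rest => if g.contains word then i else pvPriorityLoop word rest

def pvPriority (word : String) : Int :=
  pvPriorityLoop word (PySem.List.enumerate pvGroups)

def suggest_workflow_alt (keywords : List String) : String :=
  let best : Int := keywords.foldl
    (fun best word =>
      let p := pvPriority word
      if p < best then p else best)
    (pvGroups.length : Int)
  (PySem.List.pyGet? pvNames best).getD ""

-- ===== PRECONDITION & SPEC =====
def Spec_suggest_workflow (keywords : List String) (out : String) : Prop := out = suggest_workflow_alt keywords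
instance (keywords : List String) (out : String) : Decidable (Spec_suggest_workflow keywords out) := by unfold Spec_suggest_workflow; infer_instance

-- ===== CLAIM (what is proved, stated in full; the proofs are below) =====
def Claim_equal_suggest_workflow : Prop := ∀ (keywords : List String), Dom_suggest_workflow keywords → Spec_suggest_workflow keywords (suggest_workflow keywords)

-- ===== LEMMAS AND PROOFS =====

-- the five membership tests, named
def pvM1 (l : List String) : Bool := ["token", "new", "create", "add"].any (fun w => l.contains w)
def pvM2 (l : List String) : Bool := ["refactor", "change", "modify", "restructure"].any (fun w => l.contains w)
def pvM3 (l : List String) : Bool := ["documentation", "doc", "markdown"].any (fun w => l.contains w)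
def pvM4 (l : List String) : Bool := ["file", "folder", "organization", "structure"].any (fun w => l.contains w)
def pvM5 (l : List String) : Bool := ["debug", "issue", "problem", "error"].any (fun w => l.contains w)

-- index of the first true flag (5 if none)
def pvT (b1 b2 b3 b4 b5 : Bool) : Int :=
  if b1 then 0 else if b2 then 1 else if b3 then 2 else if b4 then 3 else if b5 then 4 else 5

-- first group matched by the whole list: A's choice as an Int
def pvTarget (l : List String) : Int := pvT (pvM1 l) (pvM2 l) (pvM3 l) (pvM4 l) (pvM5 l)

lemma pvT_min (a1 a2 a3 a4 a5 b1 b2 b3 b4 b5 : Bool) :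
    pvT (a1 || b1) (a2 || b2) (a3 || b3) (a4 || b4) (a5 || b5)
      = min (pvT a1 a2 a3 a4 a5) (pvT b1 b2 b3 b4 b5) := by
  revert a1 a2 a3 a4 a5 b1 b2 b3 b4 b5; decide

lemma pvAny_contains_cons (g : List String) (k : String) (rest : List String) :
    (g.any fun w => (k :: rest).contains w) = (g.contains k || g.any fun w => rest.contains w) := by
  rw [Bool.eq_iff_iff]
  simp only [List.any_eq_true, List.contains_eq_mem, decide_eq_true_eq, List.mem_cons,
             Bool.or_eq_true]
  constructor
  · rintro ⟨w, hw, rfl | h⟩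
    · exact Or.inl hw
    · exact Or.inr ⟨w, hw, h⟩
  · rintro (h | ⟨w, hw, h⟩)
    · exact ⟨k, h, Or.inl rfl⟩
    · exact ⟨w, hw, Or.inr h⟩

lemma pvPriority_eq (w : String) :
    pvPriority w = pvT (["token", "new", "create", "add"].contains w)
      (["refactor", "change", "modify", "restructure"].contains w)
      (["documentation", "doc", "markdown"].contains w)
      (["file", "folder", "organization", "structure"].contains w)
      (["debug", "issue", "problem", "error"].contains w) := by
  simp [pvPriority, pvGroups, PySem.List.enumerate, pvPriorityLoop, pvT]

lemma pvTarget_cons (k : String) (rest : List String) :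
    pvTarget (k :: rest) = min (pvPriority k) (pvTarget rest) := by
  rw [pvPriority_eq]
  unfold pvTarget pvM1 pvM2 pvM3 pvM4 pvM5
  rw [pvAny_contains_cons, pvAny_contains_cons, pvAny_contains_cons, pvAny_contains_cons,
      pvAny_contains_cons, pvT_min]

lemma pvPriority_le (w : String) : pvPriority w ≤ 5 := by
  rw [pvPriority_eq]; unfold pvT; split_ifs <;> omega

lemma pvTarget_le (l : List String) : pvTarget l ≤ 5 := by
  unfold pvTarget pvT; split_ifs <;> omega

lemma pvTarget_nil : pvTarget [] = 5 := by decide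

lemma pvFold_eq (l : List String) (b : Int) (hb : b ≤ 5) :
    l.foldl (fun best word => let p := pvPriority word; if p < best then p else best) b
      = if pvTarget l < b then pvTarget l else b := by
  induction l generalizing b with
  | nil =>
    rw [List.foldl_nil, pvTarget_nil]
    split_ifs <;> omega
  | cons k rest ih =>
    simp only [List.foldl_cons]
    have hstep : (if pvPriority k < b then pvPriority k else b) ≤ 5 := by
      have := pvPriority_le k; split_ifs <;> omega
    rw [ih _ hstep, pvTarget_cons]
    have := pvTarget_le rest
    have := pvPriority_le k
    split_ifs at * <;> omega

-- ===== VERDICT (by name: the statement is the Claim_ definition above) =====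
theorem suggest_workflow_spec : Claim_equal_suggest_workflow := by
  intro keywords _
  unfold Spec_suggest_workflow suggest_workflow suggest_workflow_alt
  have h : (pvGroups.length : Int) = 5 := by decide
  rw [h, pvFold_eq keywords 5 (by omega)]
  have ht := pvTarget_le keywords
  have hcap : (if pvTarget keywords < 5 then pvTarget keywords else 5) = pvTarget keywords := by
    split_ifs <;> omega
  rw [hcap]
  by_cases h1 : (["token", "new", "create", "add"].any fun word => keywords.contains word) = true <;>
  by_cases h2 : (["refactor", "change", "modify", "restructure"].any fun word => keywords.contains word) = true <;>
  by_cases h3 : (["documentation", "doc", "markdown"].any fun word => keywords.contains word) = true <;>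
  by_cases h4 : (["file", "folder", "organization", "structure"].any fun word => keywords.contains word) = true <;>
  by_cases h5 : (["debug", "issue", "problem", "error"].any fun word => keywords.contains word) = true <;>
  simp at h1 h2 h3 h4 h5 <;>
  simp [pvTarget, pvT, pvM1, pvM2, pvM3, pvM4, pvM5, h1, h2, h3, h4, h5,
        PySem.List.pyGet?, PySem.List.pyIdx?, pvNames]
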